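-- pv_equiv track=rewrite | github.com/illinois-or-research-analytics/network_evaluation | commdet_acc/compute_cd_accuracy.py | get_cluster_node_pairs
-- ===== SOURCE A (Python) =====
-- def get_cluster_node_pairs(partition):
--     n = len(partition)
--     return set(
--         [
--             (i, j)
--             for i in range(n)
--             for j in range(i + 1, n)
--             if partition[i] == partition[j]
--         ]
--     )
-- ===== SOURCE B (Python) =====
-- def get_cluster_node_pairs(partition):
--     groups = {}
--     for j, lab in enumerate(partition):
--         groups.setdefault(lab, []).append(j)
--     out = []
--     for i, lab in enumerate(partition):
--         out.extend((i, j) for j in groups[lab] if j > i)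
--     return set(out)
-- ===== Notes on version B (the rewrite author's own statement) =====
-- stated objective: alternative
-- what changed: replaces the all-pairs double loop over indices by a one-pass grouping of indices by label followed by emitting only within-group pairs
import Mathlib
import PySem

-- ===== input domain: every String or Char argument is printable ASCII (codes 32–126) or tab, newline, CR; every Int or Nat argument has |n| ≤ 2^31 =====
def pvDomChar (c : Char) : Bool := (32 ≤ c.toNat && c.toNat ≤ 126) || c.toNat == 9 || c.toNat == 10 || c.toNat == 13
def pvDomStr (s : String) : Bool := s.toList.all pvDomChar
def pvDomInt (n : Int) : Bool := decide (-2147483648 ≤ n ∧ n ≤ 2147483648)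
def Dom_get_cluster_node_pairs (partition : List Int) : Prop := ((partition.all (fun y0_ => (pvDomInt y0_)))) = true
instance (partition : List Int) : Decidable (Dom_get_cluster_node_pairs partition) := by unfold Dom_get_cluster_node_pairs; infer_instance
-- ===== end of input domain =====

-- B groups indices by label in one pass and emits only within-group pairs, instead of A's all-pairs double loop (work proportional to n plus within-cluster pairs; not measurably faster on a timing run's single-cluster inputs).


-- ===== PORT A =====
-- literal port of A: set([(i, j) for i in range(n) for j in range(i+1, n) if partition[i] == partition[j]])
def get_cluster_node_pairs (partition : List Int) : List (Int × Int) :=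
  let n := PySem.List.len partition
  PySem.Set.ofList
    ((PySem.List.pyRange 0 n).flatMap (fun i =>
      ((PySem.List.pyRange (i + 1) n).filter
        (fun j => PySem.List.pyGetD partition i 0 == PySem.List.pyGetD partition j 0)).map
        (fun j => (i, j))))

-- ===== PORT B =====
-- literal port of Source B: group indices by label in one pass, then emit (i, j) for later same-group indices j
def get_cluster_node_pairs_alt (partition : List Int) : List (Int × Int) :=
  let groups := (PySem.List.enumerate partition).foldl
      (fun d p => d.modify p.2 [] (fun t => t ++ [p.1])) PySem.Dict.empty
  let out := (PySem.List.enumerate partition).foldl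
      (fun acc p =>
        acc ++ ((groups.getD p.2 []).filter (fun j => decide (p.1 < j))).map (fun j => (p.1, j))) []
  PySem.Set.ofList out

-- ===== PRECONDITION & SPEC =====
def Spec_get_cluster_node_pairs (partition : List Int) (out : List (Int × Int)) : Prop := out = get_cluster_node_pairs_alt partition
instance (partition : List Int) (out : List (Int × Int)) : Decidable (Spec_get_cluster_node_pairs partition out) := by unfold Spec_get_cluster_node_pairs; infer_instance

-- ===== CLAIM (what is proved, stated in full; the proofs are below) =====
def Claim_equal_get_cluster_node_pairs : Prop := ∀ (partition : List Int), Dom_get_cluster_node_pairs partition → Spec_get_cluster_node_pairs partition (get_cluster_node_pairs partition)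

-- ===== LEMMAS AND PROOFS =====

-- B's grouping dict: the indices stored under label l are exactly the indices of range(n) carrying label l, in order.
lemma groups_getD (partition : List Int) (l : Int) :
    (((PySem.List.pyRange 0 (PySem.List.len partition)).map
          (fun j => (j, PySem.List.pyGetD partition j 0))).foldl
        (fun d p => d.modify p.2 [] (fun t => t ++ [p.1])) PySem.Dict.empty).getD l []
      = (PySem.List.pyRange 0 (PySem.List.len partition)).filter
          (fun j => PySem.List.pyGetD partition j 0 == l) := by
  have h : (((PySem.List.pyRange 0 (PySem.List.len partition)).map
          (fun j => (j, PySem.List.pyGetD partition j 0))).foldl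
        (fun d p => d.modify p.2 [] (fun t => t ++ [p.1])) PySem.Dict.empty)
      = (((PySem.List.pyRange 0 (PySem.List.len partition)).map
          (fun j => (PySem.List.pyGetD partition j 0, j))).foldl
        (fun d q => d.modify q.1 [] (fun t => t ++ [q.2])) PySem.Dict.empty) := by
    rw [List.foldl_map, List.foldl_map]
  rw [h, PySem.Dict.getD_foldl_modify_append, PySem.Dict.getD_empty]
  simp [List.filter_map, List.map_map, Function.comp_def]

lemma filter_range_tail (i n : Int) (hi : 0 ≤ i) (hin : i < n) (q : Int → Bool) :
    ((PySem.List.pyRange 0 n).filter q).filter (fun j => decide (i < j))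
      = (PySem.List.pyRange (i + 1) n).filter q := by
  rw [List.filter_filter,
      PySem.List.pyRange_one_append 0 (i + 1) n (by omega) (by omega), List.filter_append]
  have h1 : (PySem.List.pyRange 0 (i + 1)).filter (fun a => decide (i < a) && q a) = [] := by
    rw [List.filter_eq_nil_iff]
    intro a ha
    have := PySem.List.mem_pyRange_one.mp ha
    simp only [Bool.and_eq_true, decide_eq_true_eq]
    omega
  rw [h1, List.nil_append]
  apply List.filter_congr
  intro a ha
  have := PySem.List.mem_pyRange_one.mp ha
  simp [decide_eq_true_eq]
  omega

-- ===== VERDICT (by name: the statement is the Claim_ definition above) =====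
theorem get_cluster_node_pairs_spec : Claim_equal_get_cluster_node_pairs := by
  intro partition _
  unfold Spec_get_cluster_node_pairs get_cluster_node_pairs get_cluster_node_pairs_alt
  simp only
  congr 1
  rw [PySem.List.foldl_append_eq_flatMap, List.nil_append,
      PySem.List.enumerate_eq_map_pyRange partition 0, List.flatMap_map]
  apply (List.flatMap_congr _).symm
  intro i hi
  obtain ⟨h0, hn⟩ := PySem.List.mem_pyRange_one.mp hi
  simp only
  rw [groups_getD, filter_range_tail i _ h0 hn]
  congr 1
  apply List.filter_congr
  intro j _
  simp [eq_comm]
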